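-- pv_equiv track=rewrite | github.com/shreyshah97/CSCI-561-Foundations-of-Artificial-Intelligence | Homework 3/homework.py | standardize_variables_names
-- ===== SOURCE A (Python) =====
-- def substitute_vars(rule, old_var, new_var):
--     rule = rule.replace(("(" + old_var + ","), ("(" + new_var + ","))
--     rule = rule.replace(("," + old_var + ","), ("," + new_var + ","))
--     rule = rule.replace(("," + old_var + ")"), ("," + new_var + ")"))
--     rule = rule.replace(("(" + old_var + ")"), ("(" + new_var + ")"))
--     return rule
--
-- def get_standardize_local_var(var):
--     if (ord(var[1]) == ord('z')):
--         var = chr(ord(var[0])+1) + 'a%'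
--     else:
--         var = var[0] + chr(ord(var[1])+1) + '%'
--     return var
--
-- def standardize_variables_names(rule, next_var):
--
--     local_var_map, new_rule = {}, rule
--     for start in range(len(rule)):
--         if (rule[start] == '('):
--             for end in range(start + 1, len(rule), 1):
--                 if (rule[end] == ')'):
--                     vars = rule[start + 1:end].split(',')
--                     for j in range(len(vars)):
--                         if (vars[j][0].islower() and vars[j] not in local_var_map):
--                             next_var = get_standardize_local_var(next_var)
--                             local_var_map[vars[j]] = next_var
--                     break
--     new_rule = rule
--     for var in reversed(sorted(local_var_map.keys())):
--         new_rule = substitute_vars(new_rule, var, local_var_map[var])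
--     new_rule = new_rule.replace('%', '#')
--     return new_rule, next_var.replace('%', '#')
-- ===== SOURCE B (Python) =====
-- def _next_name(var):
--     if var[1] == 'z':
--         return chr(ord(var[0]) + 1) + 'a%'
--     return var[0] + chr(ord(var[1]) + 1) + '%'
--
-- def standardize_variables_names(rule, next_var):
--     # every '(' is paired with the ')' that terminates its ')'-chunk; the text between
--     # the k-th '(' of a chunk and that ')' is '('.join(parts[k:])
--     mapping = {}
--     for chunk in rule.split(')')[:-1]:
--         parts = chunk.split('(')
--         for k in range(1, len(parts)):
--             for v in '('.join(parts[k:]).split(','):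
--                 if v and v[0].islower() and v not in mapping:
--                     next_var = _next_name(next_var)
--                     mapping[v] = next_var
--     new_rule = rule
--     for var in sorted(mapping, reverse=True):
--         val = mapping[var]
--         for pre, post in (('(', ','), (',', ','), (',', ')'), ('(', ')')):
--             new_rule = new_rule.replace(pre + var + post, pre + val + post)
--     return new_rule.replace('%', '#'), next_var.replace('%', '#')
-- ===== Notes on version B (the rewrite author's own statement) =====
-- stated objective: faster
-- what changed: B replaces A's per-position loop with a forward scan to the first ')' for every '(' by one split of the rule on ')' (each '(' pairs with the ')' terminating its chunk, the enclosed text being '('.join(parts[k:])), and sorts the substitution keys descending directly instead of reversing an ascending sort.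
-- crash fix: On rules whose processed parenthesis groups contain an empty comma-piece (e.g. 'P()' or 'P(x,)'), A raises IndexError at vars[j][0] while B skips the empty piece and returns the standardized rule. — e.g. on standardize_variables_names("P()", "aa"): A raises IndexError, B returns ("P()", "aa")
import Mathlib
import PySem

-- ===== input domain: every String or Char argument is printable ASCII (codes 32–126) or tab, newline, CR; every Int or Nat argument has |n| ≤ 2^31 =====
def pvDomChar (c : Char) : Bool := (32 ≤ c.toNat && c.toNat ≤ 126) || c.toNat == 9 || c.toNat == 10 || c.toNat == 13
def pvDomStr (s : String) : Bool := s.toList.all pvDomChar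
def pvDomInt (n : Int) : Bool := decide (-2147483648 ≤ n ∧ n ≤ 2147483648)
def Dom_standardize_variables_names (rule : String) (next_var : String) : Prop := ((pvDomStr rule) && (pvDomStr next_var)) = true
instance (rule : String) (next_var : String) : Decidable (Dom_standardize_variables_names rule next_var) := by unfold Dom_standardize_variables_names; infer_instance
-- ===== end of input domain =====

-- B pairs every '(' with the ')' terminating its ')'-chunk via one split of the rule
-- (no per-position scanning) and sorts the substitution keys descending directly;
-- equivalence of the return value is proved on all inputs.

-- ===== PORT A =====
-- state of the discovery loop: (local_var_map, next_var)
abbrev PvSt := PySem.Dict String String × List Char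

def pvSubstVars (r old new : List Char) : List Char :=
  let r1 := PySem.Chars.replace r ('(' :: old ++ [',']) ('(' :: new ++ [','])
  let r2 := PySem.Chars.replace r1 (',' :: old ++ [',']) (',' :: new ++ [','])
  let r3 := PySem.Chars.replace r2 (',' :: old ++ [')']) (',' :: new ++ [')'])
  PySem.Chars.replace r3 ('(' :: old ++ [')']) ('(' :: new ++ [')'])

def pvGetStdLocalVar (v : List Char) : List Char :=
  match v with
  | c0 :: c1 :: _ =>
      if c1 = 'z' then [Char.ofNat (c0.toNat + 1), 'a', '%']
      else [c0, Char.ofNat (c1.toNat + 1), '%']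
  | _ => []  -- Python raises IndexError here (excluded by Pre_)

-- inner 'for end in range(start+1, len(rule))' loop with its break: first ')' at index ≥ e
def pvScanClose (cs : List Char) (e : Nat) : Option Nat :=
  if h : e < cs.length then (if cs[e] = ')' then some e else pvScanClose cs (e + 1))
  else none
termination_by cs.length - e

def pvAVarStep (st : PvSt) (v : List Char) : PvSt :=
  match PySem.List.pyGet? v 0 with
  | none => st  -- Python raises IndexError here (excluded by Pre_)
  | some c =>
      if PySem.Chars.islower c && !(st.1.contains (String.ofList v)) then
        let nv := pvGetStdLocalVar st.2
        (st.1.insert (String.ofList v) (String.ofList nv), nv)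
      else st

def pvAStart (cs : List Char) (st : PvSt) (start : Int) : PvSt :=
  if PySem.List.pyGet? cs start = some '(' then
    match pvScanClose cs (start.toNat + 1) with
    | some e =>
        (PySem.Chars.splitOn ((cs.drop (start.toNat + 1)).take (e - (start.toNat + 1))) [',']).foldl
          pvAVarStep st
    | none => st
  else st

def standardize_variables_names (rule : String) (next_var : String) : String × String :=
  let cs := rule.toList
  let st := (PySem.List.pyRange 0 cs.length).foldl (pvAStart cs) (PySem.Dict.empty, next_var.toList)
  let keys := (PySem.List.sorted st.1.keys (fun x => x) false).reverse
  let newRule := keys.foldl (fun r k => pvSubstVars r k.toList (st.1.getD k "").toList) cs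
  (String.ofList (PySem.Chars.replace newRule ['%'] ['#']),
   String.ofList (PySem.Chars.replace st.2 ['%'] ['#']))

-- ===== PORT B =====
def pvNextName (v : List Char) : List Char :=
  match v with
  | c0 :: c1 :: _ =>
      if c1 = 'z' then [Char.ofNat (c0.toNat + 1), 'a', '%']
      else [c0, Char.ofNat (c1.toNat + 1), '%']
  | _ => []  -- Python raises IndexError here (excluded by Pre_)

def pvBVarStep (st : PvSt) (v : List Char) : PvSt :=
  match v with
  | [] => st
  | c :: _ =>
      if PySem.Chars.islower c && !(st.1.contains (String.ofList v)) then
        let nv := pvNextName st.2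
        (st.1.insert (String.ofList v) (String.ofList nv), nv)
      else st

-- one chunk ending at a ')': the k-th '(' of the chunk pairs with that ')', and the text
-- between them is '('.join(parts[k:])
def pvBChunk (st : PvSt) (chunk : List Char) : PvSt :=
  let parts := PySem.Chars.splitOn chunk ['(']
  (PySem.List.pyRange 1 parts.length).foldl
    (fun st k =>
      (PySem.Chars.splitOn (PySem.Chars.join ['('] (PySem.List.slice parts (some k) none)) [',']).foldl
        pvBVarStep st)
    st

def pvSubPairs : List (Char × Char) := [('(', ','), (',', ','), (',', ')'), ('(', ')')]

def standardize_variables_names_alt (rule : String) (next_var : String) : String × String :=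
  let cs := rule.toList
  let st := ((PySem.Chars.splitOn cs [')']).dropLast).foldl pvBChunk (PySem.Dict.empty, next_var.toList)
  let keys := PySem.List.sorted st.1.keys (fun x => x) true
  let newRule := keys.foldl (fun r k =>
      pvSubPairs.foldl
        (fun r pq => PySem.Chars.replace r (pq.1 :: k.toList ++ [pq.2]) (pq.1 :: (st.1.getD k "").toList ++ [pq.2])) r) cs
  (String.ofList (PySem.Chars.replace newRule ['%'] ['#']),
   String.ofList (PySem.Chars.replace st.2 ['%'] ['#']))

-- ===== PRECONDITION & SPEC =====
-- Pre_-side helpers (independent of the ports): the comma-separated pieces of every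
-- parenthesis group A processes (each '(' paired with the first later ')').
def pvFirstClose (cs : List Char) (e : Nat) : Option Nat :=
  (List.range' e (cs.length - e)).find? (fun j => cs[j]? = some ')')

def pvPieces (cs : List Char) : List (List Char) :=
  (List.range cs.length).flatMap (fun i =>
    if cs[i]? = some '(' then
      match pvFirstClose cs (i + 1) with
      | some e => PySem.Chars.splitOn ((cs.drop (i + 1)).take (e - (i + 1))) [',']
      | none => []
    else [])

-- Pre_ excludes exactly the inputs where Python A raises IndexError: an empty piece inside a
-- processed parenthesis group (vars[j][0]), or a next_var shorter than 2 characters while some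
-- lowercase-initial piece forces a call to get_standardize_local_var (var[1]).
def Pre_standardize_variables_names (rule : String) (next_var : String) : Prop :=
  (∀ p ∈ pvPieces rule.toList, p ≠ []) ∧
  ((∃ p ∈ pvPieces rule.toList, p ≠ [] ∧ PySem.Chars.islower (p.headD ' ') = true) →
    2 ≤ next_var.toList.length)
instance (rule : String) (next_var : String) : Decidable (Pre_standardize_variables_names rule next_var) := by
  unfold Pre_standardize_variables_names; infer_instance

def pvWitness_standardize_variables_names : String × String := ("A(x,y)", "aa")

-- On inputs whose processed parenthesis groups contain an empty comma-piece (and whose next_var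
-- is long enough whenever a lowercase variable occurs), Python A raises IndexError while B
-- simply skips the empty pieces and returns the standardized rule.
def Raises_standardize_variables_names (rule : String) (next_var : String) : Prop :=
  (∃ p ∈ pvPieces rule.toList, p = []) ∧
  ((∃ p ∈ pvPieces rule.toList, p ≠ [] ∧ PySem.Chars.islower (p.headD ' ') = true) →
    2 ≤ next_var.toList.length)
instance (rule : String) (next_var : String) : Decidable (Raises_standardize_variables_names rule next_var) := by
  unfold Raises_standardize_variables_names; infer_instance

def pvRaiseWitness_standardize_variables_names : String × String := ("P()", "aa")
def pvRaiseWitnessOut_standardize_variables_names : String × String := ("P()", "aa")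

def Spec_standardize_variables_names (rule : String) (next_var : String) (out : String × String) : Prop :=
  out = standardize_variables_names_alt rule next_var
instance (rule : String) (next_var : String) (out : String × String) : Decidable (Spec_standardize_variables_names rule next_var out) := by
  unfold Spec_standardize_variables_names; infer_instance

-- ===== CLAIM (what is proved, stated in full; the proofs are below) =====
def Claim_equal_standardize_variables_names : Prop := ∀ (rule : String) (next_var : String), Dom_standardize_variables_names rule next_var → Pre_standardize_variables_names rule next_var → Spec_standardize_variables_names rule next_var (standardize_variables_names rule next_var)

def Claim_raises_standardize_variables_names : Prop := (∀ (rule : String) (next_var : String), Dom_standardize_variables_names rule next_var → Raises_standardize_variables_names rule next_var → ¬ Pre_standardize_variables_names rule next_var) ∧ (Dom_standardize_variables_names (pvRaiseWitness_standardize_variables_names.1) (pvRaiseWitness_standardize_variables_names.2) ∧ Raises_standardize_variables_names (pvRaiseWitness_standardize_variables_names.1) (pvRaiseWitness_standardize_variables_names.2) ∧ standardize_variables_names_alt (pvRaiseWitness_standardize_variables_names.1) (pvRaiseWitness_standardize_variables_names.2) = pvRaiseWitnessOut_standardize_variables_names)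

-- ===== LEMMAS AND PROOFS =====

-- ---- the two per-variable steps and the two fresh-name helpers agree ----

theorem pvName_eq : ∀ v, pvGetStdLocalVar v = pvNextName v := by
  intro v
  match v with
  | [] => rfl
  | [c] => rfl
  | c0 :: c1 :: t => rfl

theorem pvVarStep_eq : pvAVarStep = pvBVarStep := by
  funext st v
  match v with
  | [] => rfl
  | c :: t => simp [pvAVarStep, pvBVarStep, pvName_eq]

-- ---- a clean recursive model of single-character split, and its splitOn bridge ----

def mySplit (ch : Char) : List Char → List (List Char)
  | [] => [[]]
  | c :: t => if c = ch then [] :: mySplit ch t else (mySplit ch t).modifyHead (c :: ·)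

theorem mySplit_ne_nil (ch : Char) (l : List Char) : mySplit ch l ≠ [] := by
  induction l with
  | nil => simp [mySplit]
  | cons c t ih =>
    simp only [mySplit]
    split
    · simp
    · cases h : mySplit ch t with
      | nil => exact absurd h ih
      | cons p ps => simp [List.modifyHead]

theorem splitOn_go_eq (ch : Char) :
    ∀ (fuel : Nat) (l cur : List Char) (acc : List (List Char)), l.length < fuel →
      PySem.Chars.splitOn.go [ch] fuel l cur acc =
        acc.reverse ++ (mySplit ch l).modifyHead (cur.reverse ++ ·) := by
  intro fuel
  induction fuel with
  | zero => intro l cur acc h; omega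
  | succ fuel ih =>
    intro l cur acc h
    cases l with
    | nil =>
      simp [PySem.Chars.splitOn.go, mySplit, List.modifyHead]
    | cons c rest =>
      simp only [PySem.Chars.splitOn.go]
      by_cases hc : c = ch
      · subst hc
        have hpre : [c].isPrefixOf (c :: rest) = true := by simp [List.isPrefixOf]
        simp only [hpre, if_true, List.length_cons, List.length_nil, Nat.zero_add,
          List.drop_succ_cons, List.drop_zero] at *
        rw [ih rest [] (cur.reverse :: acc) (by omega)]
        simp only [mySplit, if_true, List.reverse_nil, List.nil_append, List.reverse_cons,
          List.append_assoc, List.singleton_append, List.modifyHead]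
        cases hm : mySplit c rest with
        | nil => exact absurd hm (mySplit_ne_nil c rest)
        | cons p ps => simp [List.modifyHead]
      · have hpre : [ch].isPrefixOf (c :: rest) = false := by
          simp only [List.isPrefixOf, Bool.and_eq_false_iff, beq_eq_false_iff_ne, ne_eq]
          exact Or.inl fun hh => absurd hh.symm hc
        simp only [hpre, Bool.false_eq_true, if_false]
        rw [ih rest (c :: cur) acc (by simpa using Nat.lt_of_succ_lt_succ h)]
        congr 1
        simp only [mySplit, hc, if_false]
        cases hm : mySplit ch rest with
        | nil => exact absurd hm (mySplit_ne_nil ch rest)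
        | cons p ps => simp [List.modifyHead]

theorem splitOn_eq_mySplit (ch : Char) (s : List Char) :
    PySem.Chars.splitOn s [ch] = mySplit ch s := by
  unfold PySem.Chars.splitOn
  rw [splitOn_go_eq ch (s.length + 1) s [] [] (by omega)]
  cases hm : mySplit ch s with
  | nil => exact absurd hm (mySplit_ne_nil ch s)
  | cons p ps => simp [List.modifyHead]

theorem mySplit_of_not_mem (ch : Char) (s : List Char) (h : ch ∉ s) : mySplit ch s = [s] := by
  induction s with
  | nil => rfl
  | cons c t ih =>
    simp only [List.mem_cons, not_or] at h
    have hne : ¬ (c = ch) := fun hh => absurd hh.symm h.1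
    simp [mySplit, hne, ih h.2, List.modifyHead]

theorem mySplit_append (ch : Char) (c rest : List Char) (h : ch ∉ c) :
    mySplit ch (c ++ ch :: rest) = c :: mySplit ch rest := by
  induction c with
  | nil => simp [mySplit]
  | cons a t ih =>
    simp only [List.mem_cons, not_or] at h
    have hne : ¬ (a = ch) := fun hh => absurd hh.symm h.1
    simp only [List.cons_append, mySplit, hne, if_false, ih h.2, List.modifyHead]

theorem join_mySplit (ch : Char) (s : List Char) :
    PySem.Chars.join [ch] (mySplit ch s) = s := by
  induction s with
  | nil => simp [mySplit, PySem.Chars.join, List.intercalate]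
  | cons c t ih =>
    simp only [mySplit]
    by_cases hc : c = ch
    · subst hc
      simp only [if_true]
      cases hm : mySplit c t with
      | nil => exact absurd hm (mySplit_ne_nil c t)
      | cons p ps =>
        rw [hm] at ih
        rw [PySem.Chars.join_cons_cons]
        simp [ih]
    · simp only [hc, if_false]
      cases hm : mySplit ch t with
      | nil => exact absurd hm (mySplit_ne_nil ch t)
      | cons p ps =>
        rw [hm] at ih
        simp only [List.modifyHead]
        cases ps with
        | nil => rw [PySem.Chars.join_singleton] at ih ⊢; simp [ih]
        | cons q qs =>
          rw [PySem.Chars.join_cons_cons] at ih ⊢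
          simp [← ih]

-- ---- pvScanClose: behaviour on chunk decompositions ----

theorem pvScan_none (cs : List Char) (h : ')' ∉ cs) : ∀ e, pvScanClose cs e = none := by
  intro e
  induction hn : cs.length - e using Nat.strong_induction_on generalizing e with
  | _ n ih =>
    rw [pvScanClose]
    split
    · rename_i he
      have hne : cs[e] ≠ ')' := fun hc => h (hc ▸ List.getElem_mem he)
      rw [if_neg hne]
      exact ih (cs.length - (e+1)) (by omega) (e+1) rfl
    · rfl

theorem pvScan_close (c rest : List Char) (hc : ')' ∉ c) :
    ∀ e, e ≤ c.length → pvScanClose (c ++ ')' :: rest) e = some c.length := by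
  intro e
  induction hn : c.length - e using Nat.strong_induction_on generalizing e with
  | _ n ih =>
    intro he
    rw [pvScanClose]
    have hlen : (c ++ ')' :: rest).length = c.length + 1 + rest.length := by simp; omega
    rw [dif_pos (by omega)]
    by_cases heq : e = c.length
    · subst heq
      have hg : (c ++ ')' :: rest)[c.length]'(by omega) = ')' := by
        rw [List.getElem_append_right (le_refl _)]
        simp
      rw [if_pos hg]
    · have hel : e < c.length := by omega
      have hg : (c ++ ')' :: rest)[e]'(by omega) = getElem c e hel := List.getElem_append_left hel
      rw [hg]
      have hne : ¬ (getElem c e hel = ')') := fun hcc => hc (hcc ▸ List.getElem_mem hel)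
      rw [if_neg hne]
      exact ih (c.length - (e+1)) (by omega) (e+1) rfl (by omega)

theorem pvScan_shift (c rest : List Char) :
    ∀ q, pvScanClose (c ++ ')' :: rest) (c.length + 1 + q) =
      (pvScanClose rest q).map (fun j => c.length + 1 + j) := by
  intro q
  induction hn : rest.length - q using Nat.strong_induction_on generalizing q with
  | _ n ih =>
    rw [pvScanClose]
    conv_rhs => rw [pvScanClose]
    have hlen : (c ++ ')' :: rest).length = c.length + 1 + rest.length := by simp; omega
    by_cases hq : q < rest.length
    · rw [dif_pos (by omega), dif_pos hq]
      have hget : (c ++ ')' :: rest)[c.length + 1 + q]'(by omega) = getElem rest q hq := by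
        rw [List.getElem_append_right (by omega)]
        have h1 : c.length + 1 + q - c.length = q + 1 := by omega
        simp only [h1, List.getElem_cons_succ]
      rw [hget]
      by_cases hr : getElem rest q hq = ')'
      · rw [if_pos hr, if_pos hr]
        rfl
      · rw [if_neg hr, if_neg hr]
        have h2 : c.length + 1 + q + 1 = c.length + 1 + (q + 1) := by omega
        rw [h2]
        exact ih (rest.length - (q+1)) (by omega) (q+1) rfl
    · rw [dif_neg (by omega), dif_neg (by omega)]
      rfl

-- ---- Nat reformulations of the two loops, and the chunk decomposition ----

def procSeg (st : PvSt) (seg : List Char) : PvSt :=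
  (PySem.Chars.splitOn seg [',']).foldl pvBVarStep st

def paStep (cs : List Char) (st : PvSt) (p : Nat) : PvSt :=
  if cs[p]? = some '(' then
    match pvScanClose cs (p + 1) with
    | some e => procSeg st ((cs.drop (p + 1)).take (e - (p + 1)))
    | none => st
  else st

def pcStep (c : List Char) (st : PvSt) (p : Nat) : PvSt :=
  if getElem? c p = some '(' then procSeg st (c.drop (p + 1)) else st

theorem pvPyRangeNat (a b : Nat) :
    PySem.List.pyRange a b = (List.range' a (b - a)).map (Nat.cast : Nat → Int) := by
  induction hn : b - a using Nat.strong_induction_on generalizing a with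
  | _ n ih =>
    by_cases hab : a < b
    · rw [PySem.List.pyRange_one_cons (by exact_mod_cast hab)]
      have h1 : n = (b - (a+1)) + 1 := by omega
      rw [h1, List.range'_succ, List.map_cons]
      congr 1
      have h2 : ((a:Int) + 1) = ((a+1 : Nat) : Int) := by push_cast; ring
      rw [h2]
      exact ih (b - (a+1)) (by omega) (a+1) rfl
    · have h0 : n = 0 := by omega
      rw [h0]
      simp
      ext x
      simp [PySem.List.mem_pyRange_one]
      intro hx
      omega

theorem pvFoldConst {α β : Type} (f : β → α → β) (l : List α) (b : β)
    (h : ∀ st x, x ∈ l → f st x = st) : l.foldl f b = b := by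
  induction l generalizing b with
  | nil => rfl
  | cons x xs ih =>
    rw [List.foldl_cons, h b x (by simp)]
    exact ih b (fun st y hy => h st y (by simp [hy]))

theorem pvFirstNotMem {ch : Char} {c : List Char} (hmem : ch ∈ c) :
    ∃ a c', ch ∉ a ∧ c = a ++ ch :: c' := by
  have hsp := List.takeWhile_append_dropWhile (p := fun x => decide (x ≠ ch)) (l := c)
  have hdne : c.dropWhile (fun x => decide (x ≠ ch)) ≠ [] := by
    intro h0
    rw [h0, List.append_nil] at hsp
    have h1 := List.mem_takeWhile_imp (hsp ▸ hmem)
    simp at h1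
  refine ⟨c.takeWhile (fun x => decide (x ≠ ch)), (c.dropWhile (fun x => decide (x ≠ ch))).tail, ?_, ?_⟩
  · intro hx
    have h2 := List.mem_takeWhile_imp hx
    simp at h2
  · conv_lhs => rw [← hsp]
    congr 1
    have hh := List.head?_dropWhile_not (fun x => decide (x ≠ ch)) c
    cases hde : c.dropWhile (fun x => decide (x ≠ ch)) with
    | nil => exact absurd hde hdne
    | cons x t =>
      rw [hde] at hh
      simp only [List.head?_cons] at hh
      simp at hh
      rw [hh]
      rfl

-- B's inner loop over Int k, as a Nat fold over suffix indices
theorem pvBFoldNat (parts : List (List Char)) (st : PvSt) :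
    (PySem.List.pyRange 1 parts.length).foldl
        (fun st k =>
          (PySem.Chars.splitOn (PySem.Chars.join ['('] (PySem.List.slice parts (some k) none)) [',']).foldl
            pvBVarStep st) st
      = (List.range (parts.length - 1)).foldl
          (fun st j => procSeg st (PySem.Chars.join ['('] (parts.drop (1 + j)))) st := by
  have h := pvPyRangeNat 1 parts.length
  simp only [Nat.cast_one] at h
  rw [h, List.foldl_map, List.range'_eq_map_range, List.foldl_map]
  apply PySem.List.foldl_congr_mem
  intro st' j hj
  rw [PySem.List.slice_from_natCast]
  rfl

theorem pvRangeSplit (A C : Nat) :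
    List.range (A + 1 + C) = (List.range' 0 A ++ List.range' A 1) ++ List.range' (A + 1) C := by
  rw [List.range_eq_range']
  have h1 : List.range' 0 A 1 ++ List.range' (0 + 1 * A) 1 1 = List.range' 0 (A + 1) 1 :=
    List.range'_append
  have h2 : List.range' 0 (A + 1) 1 ++ List.range' (0 + 1 * (A + 1)) C 1 = List.range' 0 ((A + 1) + C) 1 :=
    List.range'_append
  simp only [Nat.zero_add, Nat.one_mul] at h1 h2
  rw [← h2, ← h1]

theorem pvChunk_eq_pcFold : ∀ (c : List Char) (st : PvSt),
    pvBChunk st c = (List.range c.length).foldl (pcStep c) st := by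
  intro c
  induction hn : c.length using Nat.strong_induction_on generalizing c with
  | _ n ih =>
    intro st
    by_cases hmem : '(' ∈ c
    · obtain ⟨a, c', hna, hc⟩ := pvFirstNotMem hmem
      subst hc
      have hparts : PySem.Chars.splitOn (a ++ '(' :: c') ['('] = a :: mySplit '(' c' := by
        rw [splitOn_eq_mySplit, mySplit_append _ _ _ hna]
      have hlen : (a ++ '(' :: c').length = a.length + 1 + c'.length := by
        simp [List.length_append]
        omega
      obtain ⟨m', hm'⟩ : ∃ m', (mySplit '(' c').length = m' + 1 := by
        cases hsp : mySplit '(' c' with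
        | nil => exact absurd hsp (mySplit_ne_nil _ _)
        | cons p ps => exact ⟨ps.length, by simp⟩
      -- LHS: first iteration processes all of c', the rest is pvBChunk on c'
      have hLHS : pvBChunk st (a ++ '(' :: c') = pvBChunk (procSeg st c') c' := by
        simp only [pvBChunk]
        rw [pvBFoldNat, pvBFoldNat]
        rw [hparts, splitOn_eq_mySplit '(' c']
        simp only [List.length_cons, Nat.add_sub_cancel]
        rw [hm', List.range_succ_eq_map, List.foldl_cons, List.foldl_map]
        have h0 : procSeg st (PySem.Chars.join ['('] ((a :: mySplit '(' c').drop (1 + 0)))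
            = procSeg st c' := by
          simp only [Nat.add_zero, List.drop_succ_cons, List.drop_zero, join_mySplit]
        rw [h0]
        apply PySem.List.foldl_congr_mem
        intro st' j hj
        have hd : (a :: mySplit '(' c').drop (1 + (j + 1)) = (mySplit '(' c').drop (1 + j) := by
          have : 1 + (j + 1) = (1 + j) + 1 := by omega
          rw [this, List.drop_succ_cons]
        rw [hd]
      rw [hLHS, ih c'.length (by omega) c' rfl (procSeg st c')]
      -- RHS: positions in a are no-ops, position a.length processes c', the tail is pcStep c'
      rw [← hn, hlen, pvRangeSplit, List.foldl_append, List.foldl_append]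
      have hpart1 : (List.range' 0 a.length).foldl (pcStep (a ++ '(' :: c')) st = st := by
        apply pvFoldConst
        intro st' p hp
        have hpA : p < a.length := by
          have := List.mem_range'.mp hp
          omega
        unfold pcStep
        rw [if_neg]
        intro hg
        rw [List.getElem?_append_left hpA] at hg
        exact hna (List.mem_of_getElem? hg)
      have hmid : (List.range' a.length 1).foldl (pcStep (a ++ '(' :: c')) st = procSeg st c' := by
        show pcStep (a ++ '(' :: c') st a.length = procSeg st c'
        unfold pcStep
        rw [if_pos]
        · congr 1
          rw [List.drop_append]
          simp
        · rw [List.getElem?_append_right (le_refl _)]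
          simp
      have hpart3 : ∀ st', (List.range' (a.length + 1) c'.length).foldl (pcStep (a ++ '(' :: c')) st'
          = (List.range c'.length).foldl (pcStep c') st' := by
        intro st'
        rw [List.range'_eq_map_range, List.foldl_map]
        apply PySem.List.foldl_congr_mem
        intro st'' q hq
        unfold pcStep
        have hre : a ++ '(' :: c' = (a ++ ['(']) ++ c' := by simp
        have hg : getElem? (a ++ '(' :: c') (a.length + 1 + q) = getElem? c' q := by
          rw [hre, List.getElem?_append_right (by simp only [List.length_append, List.length_singleton]; omega)]
          congr 1
          simp only [List.length_append, List.length_singleton]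
          omega
        have hdr : (a ++ '(' :: c').drop (a.length + 1 + q + 1) = c'.drop (q + 1) := by
          rw [hre, List.drop_append]
          have h1 : (a ++ ['(']).drop (a.length + 1 + q + 1) = [] :=
            List.drop_eq_nil_of_le (by simp only [List.length_append, List.length_singleton]; omega)
          rw [h1]
          simp only [List.nil_append, List.length_append, List.length_singleton]
          congr 1
          omega
        rw [hg, hdr]
      rw [hpart1, hmid, hpart3]
    · have hparts : PySem.Chars.splitOn c ['('] = [c] := by
        rw [splitOn_eq_mySplit, mySplit_of_not_mem _ _ hmem]
      rw [pvBChunk]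
      simp only [hparts, List.length_singleton]
      rw [show PySem.List.pyRange 1 ((1:Nat):Int) = [] from by
        rw [List.eq_nil_iff_forall_not_mem]
        intro x hx
        have := PySem.List.mem_pyRange_one.mp hx
        omega]
      rw [List.foldl_nil, pvFoldConst]
      intro st' p hp
      unfold pcStep
      rw [if_neg]
      intro hg
      exact hmem (List.mem_of_getElem? hg)

theorem pvAFold_eq_paFold (cs : List Char) (st0 : PvSt) :
    (PySem.List.pyRange 0 cs.length).foldl (pvAStart cs) st0 =
      (List.range cs.length).foldl (paStep cs) st0 := by
  rw [PySem.List.pyRange_zero_natCast, List.foldl_map]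
  apply PySem.List.foldl_congr_mem
  intro st p hp
  unfold pvAStart paStep
  rw [pvVarStep_eq]
  simp only [PySem.List.pyGet?_natCast, Int.toNat_natCast]
  rfl

theorem pvDiscovery_eq : ∀ (cs : List Char) (st0 : PvSt),
    (List.range cs.length).foldl (paStep cs) st0 =
      ((PySem.Chars.splitOn cs [')']).dropLast).foldl pvBChunk st0 := by
  intro cs
  induction hn : cs.length using Nat.strong_induction_on generalizing cs with
  | _ n ih =>
    intro st0
    by_cases hmem : ')' ∈ cs
    · obtain ⟨c, rest, hnc, hcs⟩ := pvFirstNotMem hmem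
      subst hcs
      have hchunks : PySem.Chars.splitOn (c ++ ')' :: rest) [')'] = c :: mySplit ')' rest := by
        rw [splitOn_eq_mySplit, mySplit_append _ _ _ hnc]
      have hdl : (c :: mySplit ')' rest).dropLast = c :: (mySplit ')' rest).dropLast :=
        List.dropLast_cons_of_ne_nil (mySplit_ne_nil _ _)
      have hlen : (c ++ ')' :: rest).length = c.length + 1 + rest.length := by
        simp [List.length_append]
        omega
      rw [← hn, hlen, pvRangeSplit, List.foldl_append, List.foldl_append]
      -- part 1: positions inside c behave like pcStep c
      have hpart1 : (List.range' 0 c.length).foldl (paStep (c ++ ')' :: rest)) st0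
          = pvBChunk st0 c := by
        rw [pvChunk_eq_pcFold, List.range_eq_range']
        apply PySem.List.foldl_congr_mem
        intro st p hp
        have hpC : p < c.length := by
          have := List.mem_range'.mp hp
          omega
        unfold paStep pcStep
        have hg : (c ++ ')' :: rest)[p]? = getElem? c p := List.getElem?_append_left hpC
        rw [hg]
        by_cases hcp : getElem? c p = some '('
        · rw [if_pos hcp, if_pos hcp]
          rw [pvScan_close c rest hnc (p+1) (by omega)]
          have hdr : (c ++ ')' :: rest).drop (p + 1) = c.drop (p + 1) ++ ')' :: rest := by
            rw [List.drop_append]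
            congr 1
            have : p + 1 - c.length = 0 := by omega
            rw [this, List.drop_zero]
          rw [hdr]
          have htk : (c.drop (p + 1) ++ ')' :: rest).take (c.length - (p + 1)) = c.drop (p + 1) := by
            rw [show c.length - (p + 1) = (c.drop (p + 1)).length from by simp [List.length_drop],
              List.take_left]
          exact congrArg (fun seg => procSeg st seg) htk
        · rw [if_neg hcp, if_neg hcp]
      -- part 2: the ')' position is a no-op
      have hmid : ∀ st : PvSt, (List.range' c.length 1).foldl (paStep (c ++ ')' :: rest)) st = st := by
        intro st
        show paStep (c ++ ')' :: rest) st c.length = st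
        unfold paStep
        have hg : (c ++ ')' :: rest)[c.length]? = some ')' := by
          rw [List.getElem?_append_right (le_refl _)]
          simp
        rw [hg, if_neg (by decide)]
      -- part 3: positions after the ')' behave like paStep rest
      have hpart3 : ∀ st : PvSt, (List.range' (c.length + 1) rest.length).foldl (paStep (c ++ ')' :: rest)) st
          = (List.range rest.length).foldl (paStep rest) st := by
        intro st
        rw [List.range'_eq_map_range, List.foldl_map]
        apply PySem.List.foldl_congr_mem
        intro st' q hq
        unfold paStep
        have hre : c ++ ')' :: rest = (c ++ [')']) ++ rest := by simp
        have hg : (c ++ ')' :: rest)[c.length + 1 + q]? = rest[q]? := by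
          rw [hre, List.getElem?_append_right (by simp only [List.length_append, List.length_singleton]; omega)]
          congr 1
          simp only [List.length_append, List.length_singleton]
          omega
        rw [hg]
        by_cases hcp : rest[q]? = some '('
        · rw [if_pos hcp, if_pos hcp]
          have hsh : c.length + 1 + q + 1 = c.length + 1 + (q + 1) := by omega
          rw [hsh, pvScan_shift c rest (q + 1)]
          cases hsc : pvScanClose rest (q + 1) with
          | none => rfl
          | some j =>
            simp only [Option.map_some]
            have hdr : (c ++ ')' :: rest).drop (c.length + 1 + (q + 1)) = rest.drop (q + 1) := by
              rw [hre, List.drop_append]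
              have h1 : (c ++ [')']).drop (c.length + 1 + (q + 1)) = [] :=
                List.drop_eq_nil_of_le (by simp only [List.length_append, List.length_singleton]; omega)
              rw [h1]
              simp only [List.nil_append, List.length_append, List.length_singleton]
              congr 1
              omega
            show procSeg st' (((c ++ ')' :: rest).drop (c.length + 1 + (q + 1))).take
                (c.length + 1 + j - (c.length + 1 + (q + 1))))
              = procSeg st' ((rest.drop (q + 1)).take (j - (q + 1)))
            rw [hdr]
            have hix : c.length + 1 + j - (c.length + 1 + (q + 1)) = j - (q + 1) := by omega
            rw [hix]
        · rw [if_neg hcp, if_neg hcp]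
      rw [hpart1, hmid, hpart3, ih rest.length (by omega) rest rfl (pvBChunk st0 c),
        hchunks, hdl, List.foldl_cons, splitOn_eq_mySplit]
    · -- no ')' in the rule: nothing is discovered
      have hchunks : PySem.Chars.splitOn cs [')'] = [cs] := by
        rw [splitOn_eq_mySplit, mySplit_of_not_mem _ _ hmem]
      rw [hchunks]
      simp only [List.dropLast_singleton, List.foldl_nil]
      apply pvFoldConst
      intro st p hp
      unfold paStep
      by_cases hcp : cs[p]? = some '('
      · rw [if_pos hcp, pvScan_none cs hmem (p + 1)]
      · rw [if_neg hcp]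

-- ---- keys of the discovered map are distinct, and descending sort = reverse of ascending ----

theorem pvFoldPres {α β : Type} (P : β → Prop) (f : β → α → β)
    (h : ∀ b a, P b → P (f b a)) : ∀ (l : List α) (b : β), P b → P (l.foldl f b) := by
  intro l
  induction l with
  | nil => intro b hb; exact hb
  | cons x xs ih => intro b hb; exact ih _ (h b x hb)

theorem pvAVarStep_nodup (st : PvSt) (v : List Char) (h : st.1.keys.Nodup) :
    (pvAVarStep st v).1.keys.Nodup := by
  unfold pvAVarStep
  cases hg : PySem.List.pyGet? v 0 with
  | none => exact h
  | some c =>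
    by_cases hc : (PySem.Chars.islower c && !(st.1.contains (String.ofList v))) = true
    · simp only [hc, if_true]
      exact PySem.Dict.nodup_keys_insert _ _ _ h
    · simp only [hc]
      exact h

theorem pvAStart_nodup (cs : List Char) (st : PvSt) (j : Int) (h : st.1.keys.Nodup) :
    (pvAStart cs st j).1.keys.Nodup := by
  unfold pvAStart
  split
  · split
    · exact pvFoldPres (fun b => b.1.keys.Nodup) pvAVarStep pvAVarStep_nodup _ st h
    · exact h
  · exact h

theorem pvKeys_nodup (cs : List Char) (nv : List Char) :
    (((PySem.List.pyRange 0 cs.length).foldl (pvAStart cs) (PySem.Dict.empty, nv)).1).keys.Nodup := by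
  apply pvFoldPres (fun b => b.1.keys.Nodup) (pvAStart cs) (pvAStart_nodup cs)
  exact PySem.Dict.nodup_keys_empty

theorem pvSortedRev {α : Type} [LinearOrder α] (xs : List α) (h : xs.Nodup) :
    PySem.List.sorted xs (fun x => x) true = (PySem.List.sorted xs (fun x => x) false).reverse := by
  apply PySem.List.sorted_rev_eq_of_perm_of_pairwise_gt
  · exact (List.reverse_perm _).trans (PySem.List.sorted_perm xs _ _)
  · rw [List.pairwise_reverse]
    have hle := PySem.List.sorted_pairwise xs (fun x => x)
    have hnd : (PySem.List.sorted xs (fun x => x) false).Nodup :=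
      ((PySem.List.sorted_perm xs (fun x => x) false).nodup_iff).mpr h
    exact (hle.and hnd).imp (fun {a b} h12 => lt_of_le_of_ne h12.1 h12.2)

theorem pvSubst_eq (d : PySem.Dict String String) :
    (fun (r : List Char) (k : String) =>
        pvSubPairs.foldl (fun r pq =>
          PySem.Chars.replace r (pq.1 :: k.toList ++ [pq.2]) (pq.1 :: (d.getD k "").toList ++ [pq.2])) r)
      = (fun r k => pvSubstVars r k.toList (d.getD k "").toList) := by
  funext r k
  simp [pvSubPairs, pvSubstVars]

-- ---- main equality ----

theorem pvMain (rule : String) (next_var : String) :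
    standardize_variables_names rule next_var = standardize_variables_names_alt rule next_var := by
  simp only [standardize_variables_names, standardize_variables_names_alt]
  rw [← pvDiscovery_eq, ← pvAFold_eq_paFold]
  rw [pvSortedRev _ (pvKeys_nodup rule.toList next_var.toList)]
  rw [pvSubst_eq]

-- ===== VERDICT (by name: the statement is the Claim_ definition above) =====
theorem standardize_variables_names_spec : Claim_equal_standardize_variables_names := by
  intro rule next_var _ _
  unfold Spec_standardize_variables_names
  exact pvMain rule next_var

theorem standardize_variables_names_raises : Claim_raises_standardize_variables_names := by
  unfold Claim_raises_standardize_variables_names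
  constructor
  · rintro rule next_var _ ⟨⟨p, hp, hpe⟩, -⟩ ⟨h1, -⟩
    exact h1 p hp hpe
  · refine ⟨by decide, by decide, by decide⟩

-- corollary of the crash-fix claim: the raise witness indeed lies outside Pre_
theorem pvRaiseWitness_ok :
    ¬ Pre_standardize_variables_names (pvRaiseWitness_standardize_variables_names.1)
        (pvRaiseWitness_standardize_variables_names.2) := by
  have h := standardize_variables_names_raises
  unfold Claim_raises_standardize_variables_names at h
  exact h.1 _ _ (by decide) (by decide)
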